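-- pv_equiv track=rewrite | github.com/Currycurrycurry/FDSS_Algorithm | basic/mono_stack.py | nCow
-- ===== SOURCE A (Python) =====
-- def nCow(nums):
--     mono_stack = []
--     res = [0 for _ in range(len(nums))]
--     for i in range(len(nums)):
--         while mono_stack and nums[mono_stack[-1]] < nums[i]:
--             res[mono_stack[-1]] = i-mono_stack[-1]
--             mono_stack.pop()
--         mono_stack.append(i)
--     return sum(res)
-- ===== SOURCE B (Python) =====
-- def nCow(nums):
--     total = 0
--     n = len(nums)
--     for i in range(n):
--         for j in range(i + 1, n):
--             if nums[j] > nums[i]: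
--                 total += j - i
--                 break
--     return total
-- ===== Notes on version B (the rewrite author's own statement) =====
-- stated objective: simpler
-- what changed: Replaces the monotonic-stack single pass (stack of pending indices plus a result array) with a direct nested forward scan: for each i, find the first later element strictly greater than nums[i] and add its distance.
import Mathlib
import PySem

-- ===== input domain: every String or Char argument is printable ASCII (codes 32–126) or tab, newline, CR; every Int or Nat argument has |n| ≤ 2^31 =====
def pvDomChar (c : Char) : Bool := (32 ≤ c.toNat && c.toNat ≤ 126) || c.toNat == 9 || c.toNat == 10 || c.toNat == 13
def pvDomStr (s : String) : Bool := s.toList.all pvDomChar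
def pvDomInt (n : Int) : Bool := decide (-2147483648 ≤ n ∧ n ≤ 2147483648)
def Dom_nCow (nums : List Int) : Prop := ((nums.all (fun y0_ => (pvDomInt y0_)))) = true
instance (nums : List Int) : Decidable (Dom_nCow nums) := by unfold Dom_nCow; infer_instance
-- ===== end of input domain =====

-- B replaces A's monotonic-stack single pass with a plain nested forward scan; objective: simpler.

-- ===== PORT A =====
-- the inner `while mono_stack and nums[mono_stack[-1]] < nums[i]` loop;
-- the stack is stored with its top as the list head (indices always in range, so getD is exact)
def popLoopA (nums : List Int) (i : Nat) : List Nat → List Int → List Nat × List Int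
  | [], res => ([], res)
  | k :: st, res =>
    if nums.getD k 0 < nums.getD i 0 then
      popLoopA nums i st (res.set k ((i : Int) - (k : Int)))
    else (k :: st, res)

def nCow (nums : List Int) : Int :=
  ((List.range nums.length).foldl
    (fun s i =>
      let p := popLoopA nums i s.1 s.2
      (i :: p.1, p.2))
    (([] : List Nat), List.replicate nums.length (0 : Int))).2.sum

-- ===== PORT B =====
-- the inner `for j in range(i+1, n): if nums[j] > nums[i]: … break` scan
def firstGreaterB (nums : List Int) (i j : Nat) : Int :=
  if _h : j < nums.length then
    if nums.getD i 0 < nums.getD j 0 then (j : Int) - (i : Int)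
    else firstGreaterB nums i (j + 1)
  else 0
termination_by nums.length - j

def nCow_alt (nums : List Int) : Int :=
  (List.range nums.length).foldl (fun acc i => acc + firstGreaterB nums i (i + 1)) 0

-- ===== PRECONDITION & SPEC =====
def Spec_nCow (nums : List Int) (out : Int) : Prop := out = nCow_alt nums
instance (nums : List Int) (out : Int) : Decidable (Spec_nCow nums out) := by unfold Spec_nCow; infer_instance

-- ===== CLAIM (what is proved, stated in full; the proofs are below) =====
def Claim_equal_nCow : Prop := ∀ (nums : List Int), Dom_nCow nums → Spec_nCow nums (nCow nums)

-- ===== LEMMAS AND PROOFS =====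

-- loop invariant of A's pass: after processing indices < i, the stack holds exactly the
-- indices with no strictly greater element yet, and res holds the finished distances
def InvA (nums : List Int) (i : Nat) (s : List Nat × List Int) : Prop :=
  s.2.length = nums.length ∧
  (∀ k ∈ s.1, k < i) ∧
  s.1.Pairwise (· > ·) ∧
  (∀ k, k < i → (k ∈ s.1 ↔ ∀ j, k < j → j < i → nums.getD j 0 ≤ nums.getD k 0)) ∧
  (∀ k ∈ s.1, s.2.getD k 0 = 0) ∧
  (∀ k, k < i → k ∉ s.1 → s.2.getD k 0 = firstGreaterB nums k (k + 1)) ∧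
  (∀ k, i ≤ k → s.2.getD k 0 = 0)

theorem fg_none (nums : List Int) (k : Nat)
    (d : Nat) : ∀ j, nums.length - j ≤ d →
    (∀ m, j ≤ m → m < nums.length → nums.getD m 0 ≤ nums.getD k 0) →
    firstGreaterB nums k j = 0 := by
  induction d with
  | zero =>
    intro j hd _
    unfold firstGreaterB
    split
    · omega
    · rfl
  | succ d ih =>
    intro j hd hle
    unfold firstGreaterB
    split
    · rename_i hj
      have h1 : ¬ nums.getD k 0 < nums.getD j 0 := by
        have := hle j (le_refl j) hj; omega
      rw [if_neg h1]
      exact ih (j + 1) (by omega) (fun m hm hm2 => hle m (by omega) hm2)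
    · rfl

theorem fg_found (nums : List Int) (k i : Nat)
    (hin : i < nums.length) (hgt : nums.getD k 0 < nums.getD i 0) :
    ∀ d j, i - j ≤ d → j ≤ i →
    (∀ m, j ≤ m → m < i → nums.getD m 0 ≤ nums.getD k 0) →
    firstGreaterB nums k j = (i : Int) - (k : Int) := by
  intro d
  induction d with
  | zero =>
    intro j hd hji _
    have : j = i := by omega
    subst this
    unfold firstGreaterB
    rw [dif_pos hin, if_pos hgt]
  | succ d ih =>
    intro j hd hji hle
    by_cases hji' : j = i
    · subst hji'
      unfold firstGreaterB
      rw [dif_pos hin, if_pos hgt]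
    · have hj : j < i := by omega
      unfold firstGreaterB
      rw [dif_pos (by omega)]
      have h1 : ¬ nums.getD k 0 < nums.getD j 0 := by
        have := hle j (le_refl j) hj; omega
      rw [if_neg h1]
      exact ih (j + 1) (by omega) (by omega) (fun m hm hm2 => hle m (by omega) hm2)

-- characterization of the pop loop on a value-sorted stack
theorem popLoopA_spec (nums : List Int) (i : Nat) :
    ∀ (stack : List Nat) (res : List Int),
    stack.Pairwise (· > ·) →
    (∀ a ∈ stack, ∀ b ∈ stack, b < a → nums.getD a 0 ≤ nums.getD b 0) →
    (∀ k ∈ stack, k < res.length) →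
    ((popLoopA nums i stack res).1.Sublist stack) ∧
    (∀ k, k ∈ (popLoopA nums i stack res).1 ↔
        k ∈ stack ∧ ¬ nums.getD k 0 < nums.getD i 0) ∧
    (∀ m, (popLoopA nums i stack res).2.getD m 0 =
        if m ∈ stack ∧ nums.getD m 0 < nums.getD i 0 then (i : Int) - (m : Int)
        else res.getD m 0) ∧
    ((popLoopA nums i stack res).2.length = res.length) := by
  intro stack
  induction stack with
  | nil =>
    intro res _ _ _
    refine ⟨List.Sublist.refl _, ?_, ?_, rfl⟩
    · intro k; simp [popLoopA]
    · intro m; simp [popLoopA]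
  | cons k st ih =>
    intro res hpw hval hlen
    by_cases hp : nums.getD k 0 < nums.getD i 0
    · -- k is popped
      have hstep : popLoopA nums i (k :: st) res
          = popLoopA nums i st (res.set k ((i : Int) - (k : Int))) := by
        rw [popLoopA, if_pos hp]
      have hpw' : st.Pairwise (· > ·) := hpw.of_cons
      have hval' : ∀ a ∈ st, ∀ b ∈ st, b < a → nums.getD a 0 ≤ nums.getD b 0 :=
        fun a ha b hb hba => hval a (List.mem_cons_of_mem _ ha) b (List.mem_cons_of_mem _ hb) hba
      have hlen' : ∀ j ∈ st, j < (res.set k ((i : Int) - (k : Int))).length := by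
        intro j hj; rw [List.length_set]; exact hlen j (List.mem_cons_of_mem _ hj)
      obtain ⟨h1, h2, h3, h4⟩ := ih (res.set k ((i : Int) - (k : Int))) hpw' hval' hlen'
      rw [hstep]
      refine ⟨h1.trans (List.sublist_cons_self _ _), ?_, ?_, by rw [h4, List.length_set]⟩
      · intro m
        rw [h2 m]
        constructor
        · rintro ⟨hm, hnp⟩; exact ⟨List.mem_cons_of_mem _ hm, hnp⟩
        · rintro ⟨hm, hnp⟩
          rcases List.mem_cons.mp hm with rfl | hm'
          · exact absurd hp hnp
          · exact ⟨hm', hnp⟩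
      · intro m
        rw [h3 m]
        by_cases hm : m ∈ st ∧ nums.getD m 0 < nums.getD i 0
        · rw [if_pos hm, if_pos ⟨List.mem_cons_of_mem _ hm.1, hm.2⟩]
        · rw [if_neg hm]
          by_cases hmk : m = k
          · subst hmk
            rw [if_pos ⟨List.mem_cons_self .., hp⟩]
            have hm' : m < res.length := hlen m (List.mem_cons_self ..)
            simp [List.getD_eq_getElem?_getD, hm']
          · have : ¬ (m ∈ k :: st ∧ nums.getD m 0 < nums.getD i 0) := by
              rintro ⟨hmem, hlt⟩
              rcases List.mem_cons.mp hmem with rfl | hm'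
              · exact hmk rfl
              · exact hm ⟨hm', hlt⟩
            rw [if_neg this]
            simp [List.getD_eq_getElem?_getD,
              List.getElem?_set_ne (by omega : k ≠ m)]
    · -- loop stops: k stays, and everything below k has value ≥ nums[k] ≥ nums[i]
      have hstep : popLoopA nums i (k :: st) res = (k :: st, res) := by
        rw [popLoopA, if_neg hp]
      rw [hstep]
      refine ⟨List.Sublist.refl _, ?_, ?_, rfl⟩
      · intro m
        constructor
        · intro hm
          refine ⟨hm, ?_⟩
          rcases List.mem_cons.mp hm with rfl | hm'
          · exact hp
          · have hmk : m < k := (List.pairwise_cons.mp hpw).1 m hm'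
            have := hval k (List.mem_cons_self ..) m (List.mem_cons_of_mem _ hm') hmk
            omega
        · exact fun h => h.1
      · intro m
        by_cases hm : m ∈ k :: st ∧ nums.getD m 0 < nums.getD i 0
        · exfalso
          rcases List.mem_cons.mp hm.1 with rfl | hm'
          · exact hp hm.2
          · have hmk : m < k := (List.pairwise_cons.mp hpw).1 m hm'
            have := hval k (List.mem_cons_self ..) m (List.mem_cons_of_mem _ hm') hmk
            omega
        · rw [if_neg hm]

theorem stepA (nums : List Int) (i : Nat) (s : List Nat × List Int)
    (hi : i < nums.length) (hinv : InvA nums i s) :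
    InvA nums (i + 1) (i :: (popLoopA nums i s.1 s.2).1, (popLoopA nums i s.1 s.2).2) := by
  obtain ⟨hlen, hlt, hpw, hchar, hzero, hdone, hhi⟩ := hinv
  have hval : ∀ a ∈ s.1, ∀ b ∈ s.1, b < a → nums.getD a 0 ≤ nums.getD b 0 := by
    intro a ha b hb hba
    exact ((hchar b (hlt b hb)).mp hb) a hba (hlt a ha)
  have hlen' : ∀ k ∈ s.1, k < s.2.length := by
    intro k hk; rw [hlen]; exact lt_trans (hlt k hk) hi
  obtain ⟨hsub, hmem, hget, hplen⟩ := popLoopA_spec nums i s.1 s.2 hpw hval hlen'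
  refine ⟨by rw [hplen, hlen], ?_, ?_, ?_, ?_, ?_, ?_⟩
  · intro k hk
    rcases List.mem_cons.mp hk with rfl | hk'
    · omega
    · exact lt_trans (hlt k ((hmem k).mp hk').1) (by omega)
  · exact List.pairwise_cons.mpr ⟨fun m hm => hlt m ((hmem m).mp hm).1, hpw.sublist hsub⟩
  · -- membership characterization at i + 1
    intro k hk
    constructor
    · intro hkmem j hkj hji
      rcases List.mem_cons.mp hkmem with rfl | hk'
      · omega
      · obtain ⟨hks, hnp⟩ := (hmem k).mp hk'
        by_cases hji' : j = i
        · subst hji'; omega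
        · exact ((hchar k (hlt k hks)).mp hks) j hkj (by omega)
    · intro hall
      by_cases hki : k = i
      · subst hki; exact List.mem_cons_self ..
      · have hki' : k < i := by omega
        have hks : k ∈ s.1 :=
          (hchar k hki').mpr (fun j hkj hji => hall j hkj (by omega))
        refine List.mem_cons_of_mem _ ((hmem k).mpr ⟨hks, ?_⟩)
        have := hall i hki' (by omega)
        omega
  · -- res is 0 on the new stack
    intro k hk
    rcases List.mem_cons.mp hk with rfl | hk'
    · rw [hget k, if_neg (by rintro ⟨hks, _⟩; exact absurd (hlt k hks) (lt_irrefl _))]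
      exact hhi k (le_refl k)
    · obtain ⟨hks, hnp⟩ := (hmem k).mp hk'
      rw [hget k, if_neg (by rintro ⟨_, hlt'⟩; exact hnp hlt')]
      exact hzero k hks
  · -- finished entries carry the first-greater distance
    intro k hk hknot
    have hki : k < i := by
      rcases Nat.lt_succ_iff_lt_or_eq.mp hk with h | rfl
      · exact h
      · exact absurd (List.mem_cons_self ..) hknot
    by_cases hks : k ∈ s.1
    · -- k is popped at this step: i is its first strictly greater successor
      have hp : nums.getD k 0 < nums.getD i 0 := by
        by_contra hnp
        exact (hknot (List.mem_cons_of_mem _ ((hmem k).mpr ⟨hks, hnp⟩)))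
      rw [hget k, if_pos ⟨hks, hp⟩]
      exact (fg_found nums k i hi hp (i - (k + 1)) (k + 1) (le_refl _) (by omega)
        (fun m hm hm2 => ((hchar k hki).mp hks) m (by omega) hm2)).symm
    · rw [hget k, if_neg (by rintro ⟨hks', _⟩; exact hks hks')]
      exact hdone k hki hks
  · intro k hk
    rw [hget k, if_neg (by rintro ⟨hks, _⟩; have := hlt k hks; omega)]
    exact hhi k (by omega)

theorem foldA_inv (nums : List Int) :
    ∀ (b a : Nat) (s : List Nat × List Int), a + b ≤ nums.length → InvA nums a s →
    InvA nums (a + b) ((List.range' a b).foldl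
      (fun s i => let p := popLoopA nums i s.1 s.2; (i :: p.1, p.2)) s) := by
  intro b
  induction b with
  | zero => intro a s _ h; simpa using h
  | succ b ih =>
    intro a s hle h
    rw [List.range'_succ, List.foldl_cons]
    have := ih (a + 1) _ (by omega) (stepA nums a s (by omega) h)
    simpa [Nat.add_assoc, Nat.add_comm 1 b] using this

theorem sum_eq_foldl_getD (res : List Int) (g : Nat → Int)
    (h : ∀ k, k < res.length → res.getD k 0 = g k) :
    res.sum = (List.range res.length).foldl (fun acc i => acc + g i) 0 := by
  have h1 : res = (List.range res.length).map (fun k => res.getD k 0) := by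
    apply List.ext_getElem
    · simp
    · intro i h1 h2
      simp [List.getD_eq_getElem?_getD, h1]
  have h2 : (List.range res.length).map (fun k => res.getD k 0)
      = (List.range res.length).map g := by
    apply List.map_congr_left
    intro k hk
    exact h k (List.mem_range.mp hk)
  conv_lhs => rw [h1]
  rw [h2, List.sum_eq_foldl, List.foldl_map]

-- ===== VERDICT (by name: the statement is the Claim_ definition above) =====
theorem nCow_spec : Claim_equal_nCow := by
  intro nums _
  unfold Spec_nCow nCow nCow_alt
  have hinv0 : InvA nums 0 (([] : List Nat), List.replicate nums.length (0 : Int)) := by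
    refine ⟨by simp, by simp, by simp, ?_, by simp, by omega, ?_⟩
    · intro k hk; omega
    · intro k _
      simp [List.getD_eq_getElem?_getD, List.getElem?_replicate]
      split <;> simp
  have hfin := foldA_inv nums nums.length 0 _ (by omega) hinv0
  rw [Nat.zero_add] at hfin
  rw [show List.range nums.length = List.range' 0 nums.length from List.range_eq_range' ..]
  obtain ⟨hlen, hlt, _, hchar, hzero, hdone, _⟩ := hfin
  set s := (List.range' 0 nums.length).foldl
      (fun s i => let p := popLoopA nums i s.1 s.2; (i :: p.1, p.2))
      (([] : List Nat), List.replicate nums.length (0 : Int)) with hs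
  have hpt : ∀ k, k < s.2.length → s.2.getD k 0 = firstGreaterB nums k (k + 1) := by
    intro k hk
    rw [hlen] at hk
    by_cases hks : k ∈ s.1
    · rw [hzero k hks]
      exact (fg_none nums k (nums.length - (k + 1)) (k + 1) (by omega)
        (fun m hm hm2 => ((hchar k hk).mp hks) m (by omega) hm2)).symm
    · exact hdone k hk hks
  rw [sum_eq_foldl_getD s.2 (fun k => firstGreaterB nums k (k + 1)) hpt, hlen,
    show List.range nums.length = List.range' 0 nums.length from List.range_eq_range' ..]
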